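-- pv_equiv track=rewrite | github.com/kpatil1424/EXL_Cert_pbm | final_version_pp_rr_pr_24_july_working (1)/graph_retrieval_validator/generate_graph_from_document.py | classify_node_type
-- ===== SOURCE A (Python) =====
-- def classify_node_type(label: str) -> str:
--     label_lower = label.lower()
--     if "copay" in label_lower:
--         return "Outcome"
--     elif "deductible" in label_lower:
--         return "Precondition"
--     elif "coverage" in label_lower or "covered" in label_lower:
--         return "Scope_Rule"
--     elif "exception" in label_lower or "exclusion" in label_lower:
--         return "Exclusion"
--     elif "section" in label_lower:
--         return "Section_Header"
--     elif any(k in label_lower for k in ["cost", "charge", "fee"]):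
--         return "Outcome"
--     elif "definition" in label_lower or "means" in label_lower:
--         return "Definition"
--     else:
--         return "Definition"
-- ===== SOURCE B (Python) =====
-- _KEYWORDS = ["copay", "deductible", "coverage", "covered", "exception",
--              "exclusion", "section", "cost", "charge", "fee"]
--
-- _PRIORITY = [("Outcome", {"copay"}),
--              ("Precondition", {"deductible"}),
--              ("Scope_Rule", {"coverage", "covered"}),
--              ("Exclusion", {"exception", "exclusion"}),
--              ("Section_Header", {"section"}),
--              ("Outcome", {"cost", "charge", "fee"})]
--
--
-- def classify_node_type(label: str) -> str:
--     # Stage 1: one positional sweep over the lowercased label collecting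
--     # the set of ALL keywords that occur anywhere in it.
--     s = label.lower()
--     matched = set()
--     for i in range(len(s)):
--         for kw in _KEYWORDS:
--             if s.startswith(kw, i):
--                 matched.add(kw)
--     # Stage 2: map the matched set to a node type by priority.
--     for node_type, kws in _PRIORITY:
--         if matched & kws:
--             return node_type
--     return "Definition"
-- ===== Notes on version B (the rewrite author's own statement) =====
-- stated objective: alternative
-- what changed: Instead of A's ordered chain of independent substring tests, B first collects the set of all keywords occurring in the label in one positional sweep (a prefix test at each index), then maps that matched set to a node type via a priority table.
import Mathlib
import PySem

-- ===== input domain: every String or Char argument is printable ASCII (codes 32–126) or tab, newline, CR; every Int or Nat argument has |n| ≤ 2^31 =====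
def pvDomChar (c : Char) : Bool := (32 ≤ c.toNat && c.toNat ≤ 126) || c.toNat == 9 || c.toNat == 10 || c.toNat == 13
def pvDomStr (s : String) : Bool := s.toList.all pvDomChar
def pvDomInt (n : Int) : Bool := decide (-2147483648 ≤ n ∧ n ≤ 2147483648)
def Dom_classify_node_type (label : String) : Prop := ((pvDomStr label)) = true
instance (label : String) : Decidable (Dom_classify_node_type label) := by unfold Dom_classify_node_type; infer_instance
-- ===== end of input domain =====

-- B replaces A's ordered if/elif substring tests by a two-stage algorithm: one positional sweep collecting the set of all occurring keywords, then a priority lookup on that set (alternative decomposition, same cost).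


-- ===== PORT A =====
def classify_node_type (label : String) : String :=
  let label_lower := PySem.Str.lower label
  if PySem.Str.isIn "copay" label_lower then "Outcome"
  else if PySem.Str.isIn "deductible" label_lower then "Precondition"
  else if PySem.Str.isIn "coverage" label_lower || PySem.Str.isIn "covered" label_lower then "Scope_Rule"
  else if PySem.Str.isIn "exception" label_lower || PySem.Str.isIn "exclusion" label_lower then "Exclusion"
  else if PySem.Str.isIn "section" label_lower then "Section_Header"
  else if (["cost", "charge", "fee"] : List String).any (fun k => PySem.Str.isIn k label_lower) then "Outcome"
  else if PySem.Str.isIn "definition" label_lower || PySem.Str.isIn "means" label_lower then "Definition"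
  else "Definition"

-- ===== PORT B =====
def pvKeywords : List String :=
  ["copay", "deductible", "coverage", "covered", "exception",
   "exclusion", "section", "cost", "charge", "fee"]

def pvPriority : List (String × PySem.Set String) :=
  [("Outcome", ["copay"]),
   ("Precondition", ["deductible"]),
   ("Scope_Rule", ["coverage", "covered"]),
   ("Exclusion", ["exception", "exclusion"]),
   ("Section_Header", ["section"]),
   ("Outcome", ["cost", "charge", "fee"])]

-- Stage 1 of Source B: one sweep over positions i of the lowercased label, collecting
-- into a set every keyword that starts at position i (s.startswith(kw, i) is exact
-- as a prefix test on s.drop i for i in range(len(s))).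
def pvMatched (s : List Char) : PySem.Set String :=
  (List.range s.length).foldl
    (fun m i =>
      pvKeywords.foldl
        (fun m kw => if PySem.Chars.startswith (s.drop i) kw.toList then PySem.Set.add m kw else m)
        m)
    PySem.Set.empty

-- Stage 2 of Source B: first priority entry whose keyword set intersects the matched set.
def pvPick (rules : List (String × PySem.Set String)) (m : PySem.Set String) : String :=
  match rules with
  | [] => "Definition"
  | (t, kws) :: rest => if PySem.Set.inter m kws ≠ [] then t else pvPick rest m

def classify_node_type_alt (label : String) : String :=
  pvPick pvPriority (pvMatched (PySem.Str.lower label).toList)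

-- ===== PRECONDITION & SPEC =====
def Spec_classify_node_type (label : String) (out : String) : Prop := out = classify_node_type_alt label
instance (label : String) (out : String) : Decidable (Spec_classify_node_type label out) := by unfold Spec_classify_node_type; infer_instance

-- ===== CLAIM (what is proved, stated in full; the proofs are below) =====
def Claim_equal_classify_node_type : Prop := ∀ (label : String), Dom_classify_node_type label → Spec_classify_node_type label (classify_node_type label)

-- ===== LEMMAS AND PROOFS =====

theorem pv_mem_inner (ks : List String) (m : PySem.Set String) (c : String → Bool) (y : String) :
    y ∈ ks.foldl (fun m kw => if c kw then PySem.Set.add m kw else m) m ↔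
      y ∈ m ∨ (y ∈ ks ∧ c y = true) := by
  induction ks generalizing m with
  | nil => simp
  | cons k ks ih =>
    simp only [List.foldl_cons]
    rw [ih]
    by_cases hc : c k = true
    · simp only [hc, if_pos, PySem.Set.mem_add, List.mem_cons]
      constructor
      · rintro ((h | rfl) | h)
        · exact Or.inl h
        · exact Or.inr ⟨Or.inl rfl, hc⟩
        · exact Or.inr ⟨Or.inr h.1, h.2⟩
      · rintro (h | ⟨(rfl | h), hy⟩)
        · exact Or.inl (Or.inl h)
        · exact Or.inl (Or.inr rfl)
        · exact Or.inr ⟨h, hy⟩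
    · rw [Bool.not_eq_true] at hc
      simp only [hc, Bool.false_eq_true, if_false, List.mem_cons]
      constructor
      · rintro (h | h)
        · exact Or.inl h
        · exact Or.inr ⟨Or.inr h.1, h.2⟩
      · rintro (h | ⟨(rfl | h), hy⟩)
        · exact Or.inl h
        · simp [hc] at hy
        · exact Or.inr ⟨h, hy⟩

theorem pv_mem_outer (is : List Nat) (m : PySem.Set String) (s : List Char) (y : String) :
    y ∈ is.foldl
        (fun m i =>
          pvKeywords.foldl
            (fun m kw => if PySem.Chars.startswith (s.drop i) kw.toList then PySem.Set.add m kw else m)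
            m)
        m ↔
      y ∈ m ∨ (y ∈ pvKeywords ∧ ∃ i ∈ is, PySem.Chars.startswith (s.drop i) y.toList = true) := by
  induction is generalizing m with
  | nil => simp
  | cons i is ih =>
    simp only [List.foldl_cons]
    rw [ih, pv_mem_inner]
    constructor
    · rintro ((h | ⟨hk, hc⟩) | ⟨hk, j, hj, hc⟩)
      · exact Or.inl h
      · exact Or.inr ⟨hk, i, List.mem_cons_self .., hc⟩
      · exact Or.inr ⟨hk, j, List.mem_cons_of_mem _ hj, hc⟩
    · rintro (h | ⟨hk, j, hj, hc⟩)
      · exact Or.inl (Or.inl h)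
      · rcases List.mem_cons.mp hj with rfl | hj
        · exact Or.inl (Or.inr ⟨hk, hc⟩)
        · exact Or.inr ⟨hk, j, hj, hc⟩

theorem pv_mem_matched (s : List Char) (y : String) :
    y ∈ pvMatched s ↔
      y ∈ pvKeywords ∧ ∃ i ∈ List.range s.length, PySem.Chars.startswith (s.drop i) y.toList = true := by
  unfold pvMatched
  rw [pv_mem_outer]
  simp [PySem.Set.empty]

theorem pv_matched_iff_isIn (s : List Char) (kw : String)
    (hmem : kw ∈ pvKeywords) (hne : kw.toList ≠ []) :
    kw ∈ pvMatched s ↔ PySem.Chars.isIn kw.toList s = true := by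
  rw [pv_mem_matched]
  constructor
  · rintro ⟨-, i, -, hc⟩
    rw [PySem.Chars.startswith_iff] at hc
    exact (PySem.Chars.exists_prefix_drop_iff_isIn _ _).mp ⟨i, hc⟩
  · intro h
    obtain ⟨j, hj⟩ := (PySem.Chars.exists_prefix_drop_iff_isIn _ _).mpr h
    refine ⟨hmem, j, ?_, (PySem.Chars.startswith_iff _ _).mpr hj⟩
    rw [List.mem_range]
    by_contra hlt
    simp only [not_lt] at hlt
    rw [List.drop_eq_nil_of_le hlt] at hj
    exact hne (List.prefix_nil.mp hj)

theorem pv_inter_ne_nil (m : PySem.Set String) (kws : List String) :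
    PySem.Set.inter m kws ≠ [] ↔ ∃ k ∈ kws, k ∈ m := by
  constructor
  · intro h
    obtain ⟨y, hy⟩ := List.exists_mem_of_ne_nil _ h
    rw [PySem.Set.mem_inter] at hy
    exact ⟨y, hy.2, hy.1⟩
  · rintro ⟨k, hk, hm⟩ h
    have := (PySem.Set.mem_inter m kws k).mpr ⟨hm, hk⟩
    rw [h] at this
    simp at this

-- ===== VERDICT (by name: the statement is the Claim_ definition above) =====
theorem classify_node_type_spec : Claim_equal_classify_node_type := by
  intro label _
  unfold Spec_classify_node_type classify_node_type classify_node_type_alt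
  set s := (PySem.Str.lower label).toList with hs
  have H : ∀ kw : String, kw ∈ pvKeywords → kw.toList ≠ [] →
      ((kw ∈ pvMatched s) ↔ PySem.Str.isIn kw (PySem.Str.lower label) = true) := by
    intro kw h1 h2
    rw [pv_matched_iff_isIn s kw h1 h2]
    simp [PySem.Str.isIn, hs]
  have h1 := H "copay" (by decide) (by decide)
  have h2 := H "deductible" (by decide) (by decide)
  have h3 := H "coverage" (by decide) (by decide)
  have h4 := H "covered" (by decide) (by decide)
  have h5 := H "exception" (by decide) (by decide)
  have h6 := H "exclusion" (by decide) (by decide)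
  have h7 := H "section" (by decide) (by decide)
  have h8 := H "cost" (by decide) (by decide)
  have h9 := H "charge" (by decide) (by decide)
  have h10 := H "fee" (by decide) (by decide)
  simp only [pvPriority, pvPick, pv_inter_ne_nil, List.any_cons, List.any_nil,
    Bool.or_eq_true, Bool.or_false, List.mem_cons, List.not_mem_nil, exists_eq_or_imp,
    exists_eq_left, or_false]
  simp only [h1, h2, h3, h4, h5, h6, h7, h8, h9, h10]
  simp only [ite_self]
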